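-- pv_equiv track=rewrite | github.com/stalj/prg-basics | 04-Functions/section 6/sum_repeated/sum.py | sum_reapeated_digits
-- ===== SOURCE A (Python) =====
-- def sum_reapeated_digits(n):
--     sum = 0
--     n_str = str(n)
--     repeated = set()
--     seen = set()
--     for char in n_str:
--         if char in seen:
--             if char not in repeated:
--                 sum += int(char)*2
--                 repeated.add(char)
--             else:
--                 sum += int(char)
--         else:
--             seen.add(char)
--     return sum
-- ===== SOURCE B (Python) =====
-- def sum_reapeated_digits(n):
--     counts = {}
--     for d in str(n):
--         counts[d] = counts.get(d, 0) + 1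
--     return sum(int(d) * c for d, c in counts.items() if c >= 2)
-- ===== Notes on version B (the rewrite author's own statement) =====
-- stated objective: idiomatic
-- what changed: Replaces A's online seen/repeated set bookkeeping with nested branching by a two-phase approach: build a digit-frequency table in one pass, then sum int(d)*count over entries with count >= 2.
import Mathlib
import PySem

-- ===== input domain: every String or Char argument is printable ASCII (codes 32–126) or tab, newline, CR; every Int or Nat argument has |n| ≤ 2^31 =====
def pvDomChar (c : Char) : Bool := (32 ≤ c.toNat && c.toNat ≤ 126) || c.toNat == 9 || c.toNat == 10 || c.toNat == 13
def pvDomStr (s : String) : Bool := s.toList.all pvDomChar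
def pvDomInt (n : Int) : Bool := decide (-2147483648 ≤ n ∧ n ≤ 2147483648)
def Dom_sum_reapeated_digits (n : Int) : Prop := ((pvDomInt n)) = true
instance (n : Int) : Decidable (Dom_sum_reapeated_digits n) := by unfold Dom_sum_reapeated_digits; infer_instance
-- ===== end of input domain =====

-- B replaces A's online seen/repeated set bookkeeping by a two-phase pass (frequency table, then
-- sum over entries with count ≥ 2): a different decomposition of the same O(d) work, not faster.

-- int(char): exact for digit characters, the only characters either program applies int() to
-- (a character of str(n) reaching int() occurs at least twice there, so it cannot be '-').
def pvDigitVal (c : Char) : Int := (c.toNat : Int) - 48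

-- ===== PORT A =====
-- the body of A's 'for char in n_str' loop, acting on the state (sum, seen, repeated)
def pvStepA (st : Int × PySem.Set Char × PySem.Set Char) (ch : Char) :
    Int × PySem.Set Char × PySem.Set Char :=
  let (s, seen, repeated) := st
  if PySem.Set.contains seen ch then
    if !(PySem.Set.contains repeated ch) then
      (s + pvDigitVal ch * 2, seen, PySem.Set.add repeated ch)
    else
      (s + pvDigitVal ch, seen, repeated)
  else
    (s, PySem.Set.add seen ch, repeated)

def sum_reapeated_digits (n : Int) : Int :=
  ((PySem.Int.toStr n).toList.foldl pvStepA (0, PySem.Set.empty, PySem.Set.empty)).1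

-- ===== PORT B =====
def sum_reapeated_digits_alt (n : Int) : Int :=
  let counts := (PySem.Int.toStr n).toList.foldl
    (fun d ch => PySem.Dict.insert d ch (PySem.Dict.getD d ch 0 + 1)) PySem.Dict.empty
  counts.items.foldl
    (fun s (p : Char × Int) => if 2 ≤ p.2 then s + pvDigitVal p.1 * p.2 else s) 0

-- ===== PRECONDITION & SPEC =====
def Spec_sum_reapeated_digits (n : Int) (out : Int) : Prop := out = sum_reapeated_digits_alt n
instance (n : Int) (out : Int) : Decidable (Spec_sum_reapeated_digits n out) := by unfold Spec_sum_reapeated_digits; infer_instance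

-- ===== CLAIM (what is proved, stated in full; the proofs are below) =====
def Claim_equal_sum_reapeated_digits : Prop := ∀ (n : Int), Dom_sum_reapeated_digits n → Spec_sum_reapeated_digits n (sum_reapeated_digits n)

-- ===== LEMMAS AND PROOFS =====

-- the common value both programs compute on a character list l: the sum, over the distinct
-- characters of l (first-occurrence order), of digit-value × count for characters of count ≥ 2
def pvH (l : List Char) : Int :=
  ((PySem.Set.ofList l).map
    (fun k => if 2 ≤ (l.count k : Int) then pvDigitVal k * (l.count k : Int) else 0)).sum

lemma pv_sum_map_shift (m : List Char) (g h : Char → Int) (c : Char)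
    (hgh : ∀ d, d ≠ c → g d = h d) :
    (m.map g).sum = (m.map h).sum + (m.count c : Int) * (g c - h c) := by
  induction m with
  | nil => simp
  | cons a t ih =>
    by_cases hac : a = c
    · subst hac
      simp only [List.map_cons, List.sum_cons, List.count_cons_self, ih]
      push_cast; ring
    · rw [List.map_cons, List.sum_cons, List.map_cons, List.sum_cons,
        List.count_cons_of_ne hac, hgh a hac, ih]
      ring

lemma pv_ofList_append_singleton (p : List Char) (c : Char) :
    PySem.Set.ofList (p ++ [c]) = PySem.Set.add (PySem.Set.ofList p) c := by
  simp [PySem.Set.ofList_eq_foldl, List.foldl_append]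

lemma pvH_append (p : List Char) (c : Char) :
    pvH (p ++ [c]) = pvH p +
      (if c ∈ p then
        ((if 2 ≤ ((p.count c : Int) + 1) then pvDigitVal c * ((p.count c : Int) + 1) else 0)
          - (if 2 ≤ (p.count c : Int) then pvDigitVal c * (p.count c : Int) else 0))
       else 0) := by
  have hcount : ∀ d, d ≠ c → ((p ++ [c]).count d : Int) = (p.count d : Int) := by
    intro d hd
    rw [List.count_append, List.count_singleton]
    simp [Ne.symm hd]
  have hcc : ((p ++ [c]).count c : Int) = (p.count c : Int) + 1 := by
    rw [List.count_append]; push_cast; simp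
  set g := fun k => if 2 ≤ ((p ++ [c]).count k : Int) then pvDigitVal k * ((p ++ [c]).count k : Int) else 0 with hg
  set h := fun k => if 2 ≤ (p.count k : Int) then pvDigitVal k * (p.count k : Int) else 0 with hh
  have hagree : ∀ d, d ≠ c → g d = h d := by
    intro d hd; simp only [hg, hh, hcount d hd]
  by_cases hmem : c ∈ p
  · have hcont : PySem.Set.contains (PySem.Set.ofList p) c = true := by
      rw [PySem.Set.contains_iff]; exact (PySem.Set.mem_ofList p c).2 hmem
    have hset : PySem.Set.ofList (p ++ [c]) = PySem.Set.ofList p := by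
      rw [pv_ofList_append_singleton, PySem.Set.add, hcont]; simp
    have hone : (PySem.Set.ofList p).count c = 1 :=
      List.count_eq_one_of_mem (PySem.Set.nodup_ofList p) ((PySem.Set.mem_ofList p c).2 hmem)
    rw [pvH, hset, pv_sum_map_shift (PySem.Set.ofList p) g h c hagree, hone]
    rw [pvH, if_pos hmem]
    simp only [hg, hh, hcc]
    push_cast
    ring
  · have hcont : PySem.Set.contains (PySem.Set.ofList p) c = false := by
      rw [Bool.eq_false_iff]; intro hx
      exact hmem ((PySem.Set.mem_ofList p c).1 ((PySem.Set.contains_iff _ _).1 hx))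
    have hset : PySem.Set.ofList (p ++ [c]) = PySem.Set.ofList p ++ [c] := by
      rw [pv_ofList_append_singleton, PySem.Set.add, hcont]; simp
    have hc0 : (p.count c : Int) = 0 := by
      rw [List.count_eq_zero_of_not_mem hmem]; simp
    have hcount0 : (PySem.Set.ofList p).count c = 0 := by
      apply List.count_eq_zero_of_not_mem
      intro hx; exact hmem ((PySem.Set.mem_ofList p c).1 hx)
    rw [pvH, hset, List.map_append, List.sum_append,
      pv_sum_map_shift (PySem.Set.ofList p) g h c hagree, hcount0]
    rw [pvH, if_neg hmem]
    simp only [hg, hh, hcc, hc0, List.map_cons, List.map_nil, List.sum_cons, List.sum_nil]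
    norm_num

lemma pv_A_loop (l : List Char) :
    ∀ (p : List Char) (s : Int) (seen repeated : PySem.Set Char),
    (∀ d, PySem.Set.contains seen d = true ↔ d ∈ p) →
    (∀ d, PySem.Set.contains repeated d = true ↔ 2 ≤ p.count d) →
    s = pvH p →
    (l.foldl pvStepA (s, seen, repeated)).1 = pvH (p ++ l) := by
  induction l with
  | nil => intro p s seen repeated _ _ hs; simpa using hs
  | cons c t ih =>
    intro p s seen repeated hseen hrep hs
    rw [List.foldl_cons]
    have hseen' : ∀ e, PySem.Set.contains (PySem.Set.add seen c) e = true ↔ e ∈ p ++ [c] := by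
      intro e
      rw [PySem.Set.contains_iff, PySem.Set.mem_add, ← PySem.Set.contains_iff, hseen e]
      simp
    have hcntapp : ∀ e, (p ++ [c]).count e = p.count e + if c = e then 1 else 0 := by
      intro e; rw [List.count_append, List.count_singleton]; simp
    by_cases hmem : c ∈ p
    · have hcontseen : PySem.Set.contains seen c = true := (hseen c).2 hmem
      have hseenpc : ∀ e, PySem.Set.contains seen e = true ↔ e ∈ p ++ [c] := by
        intro e; rw [hseen e]
        simp only [List.mem_append, List.mem_singleton]
        exact ⟨fun h => Or.inl h, fun h => h.elim id (fun h2 => h2 ▸ hmem)⟩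
      by_cases hrep2 : 2 ≤ p.count c
      · have hcontrep : PySem.Set.contains repeated c = true := (hrep c).2 hrep2
        have hA : pvStepA (s, seen, repeated) c = (s + pvDigitVal c, seen, repeated) := by
          simp only [pvStepA]; rw [hcontseen, hcontrep]; simp
        rw [hA, ih (p ++ [c]) _ _ _ hseenpc
          (by intro e
              rw [hrep e, hcntapp e]
              by_cases hec : e = c
              · subst hec; rw [if_pos rfl]; omega
              · rw [if_neg (mt Eq.symm hec)]; omega)
          (by rw [pvH_append, hs]
              have h1 : (2:Int) ≤ (p.count c : Int) := by exact_mod_cast hrep2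
              rw [if_pos hmem, if_pos h1, if_pos (by omega : (2:Int) ≤ (p.count c : Int) + 1)]
              ring)]
        simp
      · have hcontrep : PySem.Set.contains repeated c = false := by
          rw [Bool.eq_false_iff]; intro hx; exact hrep2 ((hrep c).1 hx)
        have hA : pvStepA (s, seen, repeated) c
            = (s + pvDigitVal c * 2, seen, PySem.Set.add repeated c) := by
          simp only [pvStepA]; rw [hcontseen, hcontrep]; simp
        have hcnt1 : p.count c = 1 := by
          have : 1 ≤ p.count c := List.one_le_count_iff.2 hmem
          omega
        rw [hA, ih (p ++ [c]) _ _ _ hseenpc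
          (by intro e
              rw [PySem.Set.contains_iff, PySem.Set.mem_add, ← PySem.Set.contains_iff, hrep e,
                hcntapp e]
              by_cases hec : e = c
              · subst hec; rw [if_pos rfl, hcnt1]
                exact ⟨fun _ => by omega, fun _ => Or.inr rfl⟩
              · rw [if_neg (mt Eq.symm hec)]
                constructor
                · intro h; exact h.elim (fun h2 => by omega) (fun h2 => absurd h2 hec)
                · intro h; exact Or.inl (by omega))
          (by rw [pvH_append, hs, hcnt1, if_pos hmem]
              norm_num)]
        simp
    · have hcontseen : PySem.Set.contains seen c = false := by
        rw [Bool.eq_false_iff]; intro hx; exact hmem ((hseen c).1 hx)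
      have hA : pvStepA (s, seen, repeated) c = (s, PySem.Set.add seen c, repeated) := by
        simp only [pvStepA]; rw [hcontseen]; simp
      have hc0 : p.count c = 0 := List.count_eq_zero_of_not_mem hmem
      rw [hA, ih (p ++ [c]) _ _ _ hseen'
        (by intro e
            rw [hrep e, hcntapp e]
            by_cases hec : e = c
            · subst hec; rw [if_pos rfl, hc0]; omega
            · rw [if_neg (mt Eq.symm hec)]; omega)
        (by rw [pvH_append, hs, if_neg hmem]; ring)]
      simp

lemma pv_A_eq (l : List Char) :
    (l.foldl pvStepA (0, PySem.Set.empty, PySem.Set.empty)).1 = pvH l := by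
  have := pv_A_loop l [] 0 PySem.Set.empty PySem.Set.empty
    (by intro d; simp [PySem.Set.empty, PySem.Set.contains])
    (by intro d; simp [PySem.Set.empty, PySem.Set.contains])
    (by simp [pvH, PySem.Set.ofList])
  simpa using this

lemma pv_B_eq (l : List Char) :
    ((l.foldl (fun d ch => PySem.Dict.insert d ch (PySem.Dict.getD d ch 0 + 1))
        PySem.Dict.empty).items.foldl
      (fun s (p : Char × Int) => if 2 ≤ p.2 then s + pvDigitVal p.1 * p.2 else s) 0)
      = pvH l := by
  rw [PySem.Dict.foldl_insert_getD_add_one_eq_counter, PySem.Dict.items_counter]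
  have hfun : (fun (s : Int) (p : Char × Int) => if 2 ≤ p.2 then s + pvDigitVal p.1 * p.2 else s)
      = fun s p => s + (if 2 ≤ p.2 then pvDigitVal p.1 * p.2 else 0) := by
    funext s p; split_ifs <;> simp
  rw [hfun, PySem.List.foldl_add]
  simp only [pvH, List.map_map, Function.comp_def, zero_add]

-- ===== VERDICT (by name: the statement is the Claim_ definition above) =====
theorem sum_reapeated_digits_spec : Claim_equal_sum_reapeated_digits := by
  intro n _
  unfold Spec_sum_reapeated_digits sum_reapeated_digits sum_reapeated_digits_alt
  rw [pv_A_eq, pv_B_eq]
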